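-- pv_equiv track=rewrite | github.com/Lightblues/Leetcode | LC-contest/d051-100/d68.py | abbreviateProduct
-- ===== SOURCE A (Python) =====
-- def abbreviateProduct(left: int, right: int) -> str:
--     # 超时了
--     # [思路详解+详细讨论一下精度问题](https://leetcode-cn.com/problems/abbreviating-the-product-of-a-range/solution/fen-bie-ji-suan-qian-5wei-he-hou-5wei-si-dc9x/)
--     C, maxpre, mod, maxval = 0, 10**25, 10**10, 10**12
--     val, pre, suf = 1,1,1
--     for i in range(left, right+1):
--         pre *= i
--         suf *= i
--         last = 0
--         while pre > maxpre:
--             last = pre % 10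
--             pre = pre // 10
--         if last >= 5:       # 四舍五入
--             pre += 1
--         while suf % 10 == 0:
--             suf //= 10
--             C += 1
--         # suf %= mod
--         if val <= maxval:
--             val *= i
--             while val % 10 == 0:
--                 val //= 10
--     # val 记录非 0 项的数字长度
--     if len(str(val)) <= 10:
--         return str(val) + 'e' + str(C)
--     else:
--         p, s = str(pre), str(suf)
--         return p[:5] + '...' +  s[-5:] + 'e' + str(C)
--
--     if len(str(val)) <= 10:
--         return str(val) + 'e' + str(C)
--     else:
--         p, s = str(pre), str(suf)
--         while len(p) > 5:
--             p = p[:-1]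
--         while len(s) > 5:
--             s = s[1:]
--         while len(s) < 5:
--             s = '0' + s
--         return p + '...' + s + 'e' + str(C)
-- ===== SOURCE B (Python) =====
-- def abbreviateProduct(left: int, right: int) -> str:
--     # Alternative algorithm: instead of carrying the full un-truncated suffix
--     # product, track its factorization 2^a * 5^b * Q with Q coprime to 10,
--     # keeping Q mod 10^10 (and Q exactly while it is small).
--     MAXPRE, MOD, MAXVAL = 10**25, 10**10, 10**12
--     a = b = 0          # exponents of 2 and 5 in the product
--     qm = 1             # Q mod 10^10, Q = product with all factors 2 and 5 removed
--     q = 1              # Q exactly, or None once Q >= 10^10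
--     pre = 1            # rounded leading digits (same recurrence as the original)
--     val = 1            # capped zero-stripped product, decides the short format
--     for i in range(left, right + 1):
--         pre *= i
--         last = 0
--         while pre > MAXPRE:
--             last = pre % 10
--             pre //= 10
--         if last >= 5:
--             pre += 1
--         if val <= MAXVAL:
--             val *= i
--             while val % 10 == 0:
--                 val //= 10
--         while i % 2 == 0:
--             i //= 2
--             a += 1
--         while i % 5 == 0:
--             i //= 5
--             b += 1
--         qm = qm * i % MOD
--         if q is not None:
--             q *= i
--             if q >= MOD:
--                 q = None
--     C = min(a, b)
--     if len(str(val)) <= 10: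
--         return str(val) + 'e' + str(C)
--     al, bl = a - C, b - C      # one of them is 0; suffix = 2**al * 5**bl * Q
--     if q is not None and al <= 40 and bl <= 40:
--         s = str(2**al * 5**bl * q)[-5:]          # suffix known exactly
--     else:
--         # suffix >= 10^10, so its last five digits are zero-padded
--         s = str((pow(2, al, MOD) * pow(5, bl, MOD) * qm) % 10**5).zfill(5)
--     return str(pre)[:5] + '...' + s + 'e' + str(C)
-- ===== Notes on version B (the rewrite author's own statement) =====
-- stated objective: alternative
-- what changed: A carries the full un-truncated suffix product across the loop; B instead tracks the product's factorization 2^a*5^b*Q with Q kept modulo 10^10 (and exactly while small), recovering the trailing-zero count as min(a,b) and the last five digits by modular exponentiation, so every loop step works on bounded-size numbers.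
-- outside the precondition, e.g. on abbreviateProduct(-60, -52): A returns '-5364...84608e2', B returns '-5364...15392e2'
import Mathlib
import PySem

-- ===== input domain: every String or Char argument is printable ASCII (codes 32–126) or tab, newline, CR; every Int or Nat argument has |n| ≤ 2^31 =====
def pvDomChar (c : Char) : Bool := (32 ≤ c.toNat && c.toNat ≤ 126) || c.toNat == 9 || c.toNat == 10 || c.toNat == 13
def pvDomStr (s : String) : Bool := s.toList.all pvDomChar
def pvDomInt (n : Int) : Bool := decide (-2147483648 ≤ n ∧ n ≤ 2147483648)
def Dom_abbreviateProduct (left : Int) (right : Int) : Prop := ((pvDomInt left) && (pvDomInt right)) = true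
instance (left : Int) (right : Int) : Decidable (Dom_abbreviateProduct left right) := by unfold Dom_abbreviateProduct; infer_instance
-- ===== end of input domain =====

-- B replaces A's full-size suffix product by a 2^a*5^b*Q factorization kept
-- modulo 10^10 (trailing zeros = min(a,b)); objective: alternative algorithm.

-- ===== PORT A =====
-- shared inner while-loops (identical Python code appears in both A and B):
-- 'while pre > 10**25: last = pre % 10; pre //= 10'
def pvPreShrink (pre last : Int) : Int × Int :=
  if h : 10^25 < pre then pvPreShrink (PySem.Int.floordiv pre 10) (PySem.Int.mod pre 10) else (pre, last)
termination_by pre.toNat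
decreasing_by
  have he : PySem.Int.floordiv pre 10 = pre / 10 := PySem.Int.floordiv_eq_ediv_of_pos (by omega)
  rw [he]; omega

-- 'while v % 10 == 0: v //= 10'  (the 'v ≠ 0' conjunct is a totality guard only:
-- Python loops forever at v = 0, which Pre_ excludes)
def pvStripZeros (v : Int) : Int :=
  if h : v ≠ 0 ∧ PySem.Int.mod v 10 = 0 then pvStripZeros (PySem.Int.floordiv v 10) else v
termination_by v.natAbs
decreasing_by
  obtain ⟨hne, hmod⟩ := h
  rw [PySem.Int.mod_eq_zero_iff_dvd] at hmod
  obtain ⟨k, rfl⟩ := hmod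
  have : PySem.Int.floordiv (10 * k) 10 = k := by
    show Int.fdiv (10 * k) 10 = k
    exact Int.mul_fdiv_cancel_left _ (by norm_num)
  rw [this]; omega

-- A's 'while suf % 10 == 0: suf //= 10; C += 1' (same totality guard)
def pvAStripLoop (n c : Int) : Int × Int :=
  if h : n ≠ 0 ∧ PySem.Int.mod n 10 = 0 then pvAStripLoop (PySem.Int.floordiv n 10) (c + 1) else (n, c)
termination_by n.natAbs
decreasing_by
  obtain ⟨hne, hmod⟩ := h
  rw [PySem.Int.mod_eq_zero_iff_dvd] at hmod
  obtain ⟨k, rfl⟩ := hmod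
  have : PySem.Int.floordiv (10 * k) 10 = k := by
    show Int.fdiv (10 * k) 10 = k
    exact Int.mul_fdiv_cancel_left _ (by norm_num)
  rw [this]; omega

-- one iteration of A's for-loop; state (C, val, pre, suf)
def pvAStep (s : Int × Int × Int × Int) (i : Int) : Int × Int × Int × Int :=
  match s with
  | (C, val, pre, suf) =>
    let pre1 := pre * i
    let suf1 := suf * i
    let pr := pvPreShrink pre1 0
    let pre2 := if 5 ≤ pr.2 then pr.1 + 1 else pr.1
    let sc := pvAStripLoop suf1 C
    let val2 := if val ≤ 10^12 then pvStripZeros (val * i) else val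
    (sc.2, val2, pre2, sc.1)

def abbreviateProduct (left : Int) (right : Int) : String :=
  match (PySem.List.pyRange left (right + 1)).foldl pvAStep (0, 1, 1, 1) with
  | (C, val, pre, suf) =>
    if PySem.Str.len (PySem.Int.toStr val) ≤ 10 then
      PySem.Int.toStr val ++ "e" ++ PySem.Int.toStr C
    else
      PySem.Str.slice (PySem.Int.toStr pre) none (some 5) ++ "..." ++
        PySem.Str.slice (PySem.Int.toStr suf) (some (-5)) none ++ "e" ++ PySem.Int.toStr C

-- ===== PORT B =====
-- 'while i % p == 0: i //= p; c += 1' (the '2 ≤ p ∧ i ≠ 0' conjuncts are totality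
-- guards only; B calls it with p = 2 and p = 5, and i ≠ 0 inside Pre_)
def pvFacLoop (p i c : Int) : Int × Int :=
  if h : 2 ≤ p ∧ i ≠ 0 ∧ PySem.Int.mod i p = 0 then pvFacLoop p (PySem.Int.floordiv i p) (c + 1) else (i, c)
termination_by i.natAbs
decreasing_by
  obtain ⟨hp, hne, hmod⟩ := h
  rw [PySem.Int.mod_eq_zero_iff_dvd] at hmod
  obtain ⟨k, rfl⟩ := hmod
  have : PySem.Int.floordiv (p * k) p = k := by
    show Int.fdiv (p * k) p = k
    exact Int.mul_fdiv_cancel_left _ (by omega)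
  rw [this]
  have hk : 1 ≤ k.natAbs := by
    rcases Nat.eq_zero_or_pos k.natAbs with h0 | h1
    · exfalso; apply hne; have : k = 0 := by omega
      rw [this, mul_zero]
    · exact h1
  have hpn : 2 ≤ p.natAbs := by omega
  calc k.natAbs < 2 * k.natAbs := by omega
    _ ≤ p.natAbs * k.natAbs := Nat.mul_le_mul_right _ hpn
    _ = (p * k).natAbs := (Int.natAbs_mul p k).symm

-- one iteration of B's for-loop; state (a, b, qm, q, pre, val)
def pvBStep (s : Int × Int × Int × Option Int × Int × Int) (i : Int) :
    Int × Int × Int × Option Int × Int × Int :=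
  match s with
  | (a, b, qm, q, pre, val) =>
    let pr := pvPreShrink (pre * i) 0
    let pre2 := if 5 ≤ pr.2 then pr.1 + 1 else pr.1
    let val2 := if val ≤ 10^12 then pvStripZeros (val * i) else val
    let f2 := pvFacLoop 2 i a
    let f5 := pvFacLoop 5 f2.1 b
    let qm2 := PySem.Int.mod (qm * f5.1) (10^10)
    let q2 := match q with
      | none => none
      | some qv => if 10^10 ≤ qv * f5.1 then none else some (qv * f5.1)
    (f2.2, f5.2, qm2, q2, pre2, val2)

def abbreviateProduct_alt (left : Int) (right : Int) : String :=
  match (PySem.List.pyRange left (right + 1)).foldl pvBStep (0, 0, 1, some 1, 1, 1) with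
  | (a, b, qm, q, pre, val) =>
    let C := min a b
    if PySem.Str.len (PySem.Int.toStr val) ≤ 10 then
      PySem.Int.toStr val ++ "e" ++ PySem.Int.toStr C
    else
      let al := a - C
      let bl := b - C
      let s :=
        match q with
        | some qv =>
          if al ≤ 40 ∧ bl ≤ 40 then
            PySem.Str.slice (PySem.Int.toStr (2 ^ al.toNat * 5 ^ bl.toNat * qv)) (some (-5)) none
          else
            PySem.Str.zfill (PySem.Int.toStr (PySem.Int.mod
              (PySem.Int.powMod 2 al.toNat (10^10) * PySem.Int.powMod 5 bl.toNat (10^10) * qm) (10^5))) 5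
        | none =>
          PySem.Str.zfill (PySem.Int.toStr (PySem.Int.mod
            (PySem.Int.powMod 2 al.toNat (10^10) * PySem.Int.powMod 5 bl.toNat (10^10) * qm) (10^5))) 5
      PySem.Str.slice (PySem.Int.toStr pre) none (some 5) ++ "..." ++ s ++ "e" ++ PySem.Int.toStr C

-- ===== PRECONDITION & SPEC =====
-- Pre_ excludes nonempty ranges starting below 1: if the range contains 0 A's
-- zero-stripping while-loop runs forever, and on all-negative ranges A's
-- sign-dependent digit stripping and rounding produce accidental values.
def Pre_abbreviateProduct (left : Int) (right : Int) : Prop := 1 ≤ left ∨ right < left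
instance (left : Int) (right : Int) : Decidable (Pre_abbreviateProduct left right) := by
  unfold Pre_abbreviateProduct; infer_instance

def pvWitness_abbreviateProduct : Int × Int := (2, 5)

def Spec_abbreviateProduct (left : Int) (right : Int) (out : String) : Prop :=
  out = abbreviateProduct_alt left right
instance (left : Int) (right : Int) (out : String) : Decidable (Spec_abbreviateProduct left right out) := by
  unfold Spec_abbreviateProduct; infer_instance

-- ===== CLAIM (what is proved, stated in full; the proofs are below) =====
def Claim_equal_abbreviateProduct : Prop := ∀ (left : Int) (right : Int),
  Dom_abbreviateProduct left right → Pre_abbreviateProduct left right →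
  Spec_abbreviateProduct left right (abbreviateProduct left right)

-- ===== LEMMAS AND PROOFS =====

lemma pvFacLoop_spec (p : Int) (hp : 2 ≤ p) :
    ∀ (i c : Int), 1 ≤ i → ∃ (x : Nat) (j : Int),
      pvFacLoop p i c = (j, c + x) ∧ i = p ^ x * j ∧ 1 ≤ j ∧ ¬(p ∣ j) := by
  intro i c hi
  generalize hN : i.toNat = N
  induction N using Nat.strong_induction_on generalizing i c with
  | _ N IH =>
    rw [pvFacLoop]
    by_cases hd : PySem.Int.mod i p = 0
    · rw [dif_pos ⟨hp, by omega, hd⟩]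
      rw [PySem.Int.mod_eq_zero_iff_dvd] at hd
      obtain ⟨k, rfl⟩ := hd
      have hfd : PySem.Int.floordiv (p * k) p = k := by
        show Int.fdiv (p * k) p = k
        exact Int.mul_fdiv_cancel_left _ (by omega)
      have hk1 : 1 ≤ k := by nlinarith
      have hlt : k.toNat < N := by
        subst hN
        have : k < p * k := by nlinarith
        omega
      obtain ⟨x, j, h1, h2, h3, h4⟩ := IH k.toNat hlt k (c + 1) hk1 rfl
      refine ⟨x + 1, j, ?_, ?_, h3, h4⟩
      · rw [hfd, h1]; congr 1; push_cast; ring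
      · rw [pow_succ]; rw [h2]; ring
    · rw [dif_neg (by tauto)]
      refine ⟨0, i, by simp, by simp, hi, ?_⟩
      intro hdvd
      exact hd ((PySem.Int.mod_eq_zero_iff_dvd i p).mpr hdvd)

lemma pvAStripLoop_spec : ∀ (m α β : Nat) (Q c : Int), min α β = m → 1 ≤ Q →
    ¬((2:Int) ∣ Q) → ¬((5:Int) ∣ Q) →
    pvAStripLoop (2 ^ α * 5 ^ β * Q) c = (2 ^ (α - m) * 5 ^ (β - m) * Q, c + m) := by
  intro m
  induction m with
  | zero =>
    intro α β Q c hm h1 h2 h5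
    have hnd : ¬ PySem.Int.mod (2 ^ α * 5 ^ β * Q) 10 = 0 := by
      rw [PySem.Int.mod_eq_zero_iff_dvd]
      intro hdvd
      rcases Nat.min_eq_zero_iff.mp hm with ha | hb
      · subst ha
        have h2d : (2:Int) ∣ 5 ^ β * Q := by
          have : (2:Int) ∣ 10 := by norm_num
          simpa using this.trans hdvd
        rcases (Int.prime_two.dvd_mul.mp h2d) with hA | hB
        · exact absurd (Int.prime_two.dvd_of_dvd_pow hA) (by norm_num)
        · exact h2 hB
      · subst hb
        have h5d : (5:Int) ∣ 2 ^ α * Q := by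
          have : (5:Int) ∣ 10 := by norm_num
          simpa using this.trans hdvd
        have hp5 : Prime (5:Int) := Int.prime_iff_natAbs_prime.mpr (by norm_num)
        rcases (hp5.dvd_mul.mp h5d) with hA | hB
        · exact absurd (hp5.dvd_of_dvd_pow hA) (by norm_num)
        · exact h5 hB
    rw [pvAStripLoop, dif_neg (by tauto)]
    simp
  | succ m ih =>
    intro α β Q c hm h1 h2 h5
    obtain ⟨α', rfl⟩ : ∃ a', α = a' + 1 := ⟨α - 1, by omega⟩
    obtain ⟨β', rfl⟩ : ∃ b', β = b' + 1 := ⟨β - 1, by omega⟩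
    have hpos : (0:Int) < 2 ^ (α'+1) * 5 ^ (β'+1) * Q :=
      mul_pos (mul_pos (pow_pos (by norm_num) _) (pow_pos (by norm_num) _)) (by omega)
    have heq : (2:Int) ^ (α'+1) * 5 ^ (β'+1) * Q = 10 * (2 ^ α' * 5 ^ β' * Q) := by ring
    have hmod : PySem.Int.mod (2 ^ (α'+1) * 5 ^ (β'+1) * Q) 10 = 0 := by
      rw [PySem.Int.mod_eq_zero_iff_dvd, heq]
      exact Dvd.intro _ rfl
    rw [pvAStripLoop, dif_pos ⟨by omega, hmod⟩]
    have hfd : PySem.Int.floordiv (2 ^ (α'+1) * 5 ^ (β'+1) * Q) 10 = 2 ^ α' * 5 ^ β' * Q := by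
      rw [heq]
      show Int.fdiv _ _ = _
      exact Int.mul_fdiv_cancel_left _ (by norm_num)
    rw [hfd, ih α' β' Q (c+1) (by omega) h1 h2 h5]
    have e1 : α' + 1 - (m + 1) = α' - m := by omega
    have e2 : β' + 1 - (m + 1) = β' - m := by omega
    rw [e1, e2]
    congr 1
    push_cast; ring

-- decimal-digit machinery
def pvDigs (n : Nat) : List Char :=
  if n < 10 then [Nat.digitChar n] else pvDigs (n / 10) ++ [Nat.digitChar (n % 10)]
termination_by n
decreasing_by exact Nat.div_lt_self (by omega) (by omega)

def pvPad : Nat → Nat → List Char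
  | 0, _ => []
  | k + 1, r => pvPad k (r / 10) ++ [Nat.digitChar (r % 10)]

lemma pvToDigitsCore_eq : ∀ (f n : Nat) (ds : List Char), n < f →
    Nat.toDigitsCore 10 f n ds = pvDigs n ++ ds := by
  intro f
  induction f with
  | zero => omega
  | succ f ih =>
    intro n ds hn
    rw [Nat.toDigitsCore]
    by_cases h0 : n / 10 = 0
    · simp only [h0]
      have hn10 : n < 10 := by omega
      rw [pvDigs, if_pos hn10, Nat.mod_eq_of_lt hn10]
      rfl
    · simp only [if_neg h0]
      have hge : 10 ≤ n := by omega
      have hlt : n / 10 < f := by omega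
      rw [ih (n / 10) _ hlt]
      conv_rhs => rw [pvDigs, if_neg (by omega)]
      simp

lemma pvToDigits_eq (n : Nat) : Nat.toDigits 10 n = pvDigs n := by
  rw [Nat.toDigits, pvToDigitsCore_eq (n + 1) n [] (by omega)]
  simp

lemma pvDigs_append (k : Nat) : ∀ (a r : Nat), 1 ≤ a → r < 10 ^ (k + 1) →
    pvDigs (a * 10 ^ (k + 1) + r) = pvDigs a ++ pvPad (k + 1) r := by
  induction k with
  | zero =>
    intro a r ha hr
    norm_num at hr ⊢
    rw [pvDigs, if_neg (by nlinarith)]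
    have hdiv : (a * 10 + r) / 10 = a := by omega
    have hmod : (a * 10 + r) % 10 = r := by omega
    rw [hdiv, hmod]
    simp [pvPad, Nat.mod_eq_of_lt hr]
  | succ k ih =>
    intro a r ha hr
    have h100 : 10 ^ (k + 2) ≥ 100 := by
      calc (100:Nat) = 10 ^ 2 := by norm_num
      _ ≤ 10 ^ (k + 2) := Nat.pow_le_pow_right (by omega) (by omega)
    rw [pvDigs, if_neg (by nlinarith)]
    have hre : a * 10 ^ (k + 2) + r = r + (a * 10 ^ (k + 1)) * 10 := by ring
    have hdiv : (a * 10 ^ (k + 2) + r) / 10 = a * 10 ^ (k + 1) + r / 10 := by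
      rw [hre, Nat.add_mul_div_right _ _ (by omega : 0 < 10)]
      omega
    have hmod : (a * 10 ^ (k + 2) + r) % 10 = r % 10 := by
      rw [hre, Nat.add_mul_mod_self_right]
    have hrlt : r / 10 < 10 ^ (k + 1) := by
      rw [Nat.div_lt_iff_lt_mul (by omega : 0 < 10)]
      calc r < 10 ^ (k + 2) := hr
        _ = 10 ^ (k + 1) * 10 := by ring
    rw [hdiv, hmod, ih a (r / 10) ha hrlt]
    rw [show pvPad (k + 2) r = pvPad (k + 1) (r / 10) ++ [Nat.digitChar (r % 10)] from rfl]
    simp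

lemma pvPad_length : ∀ (k r : Nat), (pvPad k r).length = k := by
  intro k
  induction k with
  | zero => intro r; rfl
  | succ k ih => intro r; simp [pvPad, ih]

lemma pvPad_zero : ∀ k, pvPad k 0 = List.replicate k '0' := by
  intro k
  induction k with
  | zero => rfl
  | succ k ih =>
    show pvPad k (0 / 10) ++ [Nat.digitChar (0 % 10)] = _
    rw [Nat.zero_div, ih, show Nat.digitChar (0 % 10) = '0' from rfl, ← List.replicate_succ']

lemma pvDigs_len_le : ∀ (k r : Nat), 1 ≤ k → r < 10 ^ k → (pvDigs r).length ≤ k := by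
  intro k
  induction k with
  | zero => omega
  | succ k ih =>
    intro r _ hr
    by_cases h10 : r < 10
    · rw [pvDigs, if_pos h10]; simp
    · have hk1 : 1 ≤ k := by
        by_contra hk
        have : k = 0 := by omega
        subst this
        norm_num at hr; omega
      rw [pvDigs, if_neg h10]
      simp only [List.length_append, List.length_cons, List.length_nil]
      have := ih (r / 10) hk1 (by
        rw [Nat.div_lt_iff_lt_mul (by omega : 0 < 10)]
        calc r < 10 ^ (k + 1) := hr
          _ = 10 ^ k * 10 := by ring)
      omega

lemma pvPad_eq_replicate : ∀ (k r : Nat), 1 ≤ k → r < 10 ^ k →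
    pvPad k r = List.replicate (k - (pvDigs r).length) '0' ++ pvDigs r := by
  intro k
  induction k with
  | zero => omega
  | succ k ih =>
    intro r _ hr
    by_cases h10 : r < 10
    · rw [show pvPad (k + 1) r = pvPad k (r / 10) ++ [Nat.digitChar (r % 10)] from rfl]
      rw [show r / 10 = 0 from by omega, pvPad_zero]
      rw [pvDigs, if_pos h10, Nat.mod_eq_of_lt h10]
      simp
    · have hk1 : 1 ≤ k := by
        by_contra hk
        have : k = 0 := by omega
        subst this
        simp at hr; omega
      have hrlt : r / 10 < 10 ^ k := by
        rw [Nat.div_lt_iff_lt_mul (by omega : 0 < 10)]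
        calc r < 10 ^ (k + 1) := hr
          _ = 10 ^ k * 10 := by ring
      rw [show pvPad (k + 1) r = pvPad k (r / 10) ++ [Nat.digitChar (r % 10)] from rfl]
      rw [ih (r / 10) hk1 hrlt]
      conv_rhs => rw [pvDigs, if_neg h10]
      simp only [List.length_append, List.length_cons, List.length_nil, List.append_assoc]
      congr 2
      omega

lemma pvDigs_head (r : Nat) : ∃ (d : Nat) (t : List Char), d < 10 ∧ pvDigs r = Nat.digitChar d :: t := by
  induction r using Nat.strong_induction_on with
  | _ r IH =>
    by_cases h10 : r < 10
    · exact ⟨r, [], h10, by rw [pvDigs, if_pos h10]⟩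
    · obtain ⟨d, t, hd, ht⟩ := IH (r / 10) (Nat.div_lt_self (by omega) (by omega))
      exact ⟨d, t ++ [Nat.digitChar (r % 10)], hd, by rw [pvDigs, if_neg h10, ht]; simp⟩

lemma pvDigitChar_not_sign (d : Nat) (hd : d < 10) :
    ¬(Nat.digitChar d = '+' ∨ Nat.digitChar d = '-') := by
  interval_cases d <;> decide

lemma pvZfillNonsign (c : Char) (t : List Char) (w : Int) (hc : ¬(c = '+' ∨ c = '-')) :
    PySem.Chars.zfill (c :: t) w =
      if w ≤ ((c :: t).length : Int) then c :: t
      else List.replicate (w.toNat - (c :: t).length) '0' ++ c :: t := by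
  rw [PySem.Chars.zfill.eq_def]
  split_ifs with h1
  · rfl
  · simp [hc]

lemma pvZfill5 (r : Nat) (hr : r < 10 ^ 5) :
    PySem.Chars.zfill (pvDigs r) 5 = pvPad 5 r := by
  rw [pvPad_eq_replicate 5 r (by omega) hr]
  obtain ⟨d, t, hd, ht⟩ := pvDigs_head r
  have hlen : (pvDigs r).length ≤ 5 := pvDigs_len_le 5 r (by omega) hr
  rw [ht, pvZfillNonsign _ _ _ (pvDigitChar_not_sign d hd), ← ht]
  by_cases h5 : (5:Int) ≤ ((pvDigs r).length : Int)
  · rw [if_pos (by rw [ht] at h5 ⊢; exact h5)]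
    simp [show (pvDigs r).length = 5 from by omega]
  · rw [if_neg (by rw [ht] at h5 ⊢; exact h5)]
    congr 1

lemma pvSliceLast5 (suf : Int) (h : 10 ^ 10 ≤ suf) :
    PySem.Str.slice (PySem.Int.toStr suf) (some (-5)) none =
      PySem.Str.zfill (PySem.Int.toStr (suf % 10 ^ 5)) 5 := by
  have hnn : (0:Int) ≤ suf := le_trans (by norm_num) h
  have hN : 10000000000 ≤ suf.toNat := by
    have : (10:Int) ^ 10 = 10000000000 := by norm_num
    omega
  set N := suf.toNat with hNdef
  have hsufN : suf = (N : Int) := by omega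
  have htc : PySem.Int.toChars suf = pvDigs N := by
    rw [PySem.Int.toChars, if_neg (by omega), ← pvToDigits_eq]
  have hdm : N = (N / 10 ^ 5) * 10 ^ 5 + N % 10 ^ 5 := by
    rw [Nat.mul_comm]
    exact (Nat.div_add_mod N (10 ^ 5)).symm
  have ha1 : 1 ≤ N / 10 ^ 5 := by
    have : (10:Nat) ^ 5 = 100000 := by norm_num
    rw [Nat.le_div_iff_mul_le (by norm_num)]
    omega
  have hsplit : pvDigs N = pvDigs (N / 10 ^ 5) ++ pvPad 5 (N % 10 ^ 5) := by
    conv_lhs => rw [hdm]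
    exact pvDigs_append 4 _ _ ha1 (Nat.mod_lt _ (by norm_num))
  -- right-hand side digits
  have hmodcast : suf % 10 ^ 5 = ((N % 10 ^ 5 : Nat) : Int) := by
    rw [hsufN]
    push_cast
    rfl
  have htc2 : PySem.Int.toChars (suf % 10 ^ 5) = pvDigs (N % 10 ^ 5) := by
    rw [hmodcast, PySem.Int.toChars, if_neg (by omega), ← pvToDigits_eq]
    congr 1
  -- assemble
  rw [PySem.Str.slice, PySem.Str.zfill]
  congr 1
  rw [PySem.Int.toList_toStr, PySem.Int.toList_toStr, htc, htc2]
  rw [pvZfill5 _ (Nat.mod_lt _ (by norm_num))]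
  rw [hsplit]
  rw [show PySem.Chars.slice (pvDigs (N / 10 ^ 5) ++ pvPad 5 (N % 10 ^ 5)) (some (-5)) none =
        PySem.List.slice (pvDigs (N / 10 ^ 5) ++ pvPad 5 (N % 10 ^ 5)) (some (-5)) none from rfl]
  rw [PySem.List.slice_from_neg_ofNat _ 5 (by omega)]
  rw [List.length_append, pvPad_length]
  rw [show (pvDigs (N / 10 ^ 5)).length + 5 - 5 = (pvDigs (N / 10 ^ 5)).length from by omega]
  exact List.drop_left

-- loop invariant tying A's state to B's
def pvInv (sA : Int × Int × Int × Int) (sB : Int × Int × Int × Option Int × Int × Int) : Prop :=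
  ∃ (aN bN : Nat) (Q : Int),
    sB.1 = (aN : Int) ∧ sB.2.1 = (bN : Int) ∧
    1 ≤ Q ∧ ¬((2:Int) ∣ Q) ∧ ¬((5:Int) ∣ Q) ∧
    sB.2.2.1 = Q % 10 ^ 10 ∧
    (if Q < 10 ^ 10 then sB.2.2.2.1 = some Q else sB.2.2.2.1 = none) ∧
    sA.1 = ((min aN bN : Nat) : Int) ∧
    sA.2.1 = sB.2.2.2.2.2 ∧
    sA.2.2.1 = sB.2.2.2.2.1 ∧
    sA.2.2.2 = 2 ^ (aN - min aN bN) * 5 ^ (bN - min aN bN) * Q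

lemma pvInv_step (sA : Int × Int × Int × Int) (sB : Int × Int × Int × Option Int × Int × Int)
    (i : Int) (hi : 1 ≤ i) (h : pvInv sA sB) : pvInv (pvAStep sA i) (pvBStep sB i) := by
  obtain ⟨C, val, pre, suf⟩ := sA
  obtain ⟨a, b, qm, q, pre', val'⟩ := sB
  obtain ⟨aN, bN, Q, ha, hb, hQ1, hQ2, hQ5, hqm, hq, hC, hval, hpre, hsuf⟩ := h
  dsimp only at ha hb hqm hq hC hval hpre hsuf
  obtain ⟨x, i2, hf2, hfac2, hi2, hnd2⟩ := pvFacLoop_spec 2 (by norm_num) i a hi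
  obtain ⟨y, j, hf5, hfac5, hj, hnd5⟩ := pvFacLoop_spec 5 (by norm_num) i2 b hi2
  have hjdvd : j ∣ i2 := ⟨5 ^ y, by rw [hfac5]; ring⟩
  have hnd2j : ¬(2:Int) ∣ j := fun hd => hnd2 (hd.trans hjdvd)
  set m := min aN bN with hm
  set m' := min (aN - m + x) (bN - m + y) with hm'
  have hQ'1 : 1 ≤ Q * j := one_le_mul_of_one_le_of_one_le hQ1 hj
  have hQ'2 : ¬(2:Int) ∣ Q * j := by
    intro hd
    rcases (Int.prime_two.dvd_mul.mp hd) with h1 | h1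
    exacts [hQ2 h1, hnd2j h1]
  have hp5 : Prime (5:Int) := Int.prime_iff_natAbs_prime.mpr (by norm_num)
  have hQ'5 : ¬(5:Int) ∣ Q * j := by
    intro hd
    rcases (hp5.dvd_mul.mp hd) with h1 | h1
    exacts [hQ5 h1, hnd5 h1]
  have hsufi : suf * i = 2 ^ (aN - m + x) * 5 ^ (bN - m + y) * (Q * j) := by
    rw [hsuf, hfac2, hfac5, pow_add, pow_add]
    ring
  have hstrip := pvAStripLoop_spec m' (aN - m + x) (bN - m + y) (Q * j) C rfl hQ'1 hQ'2 hQ'5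
  refine ⟨aN + x, bN + y, Q * j, ?_, ?_, hQ'1, hQ'2, hQ'5, ?_, ?_, ?_, ?_, ?_, ?_⟩ <;>
    dsimp only [pvAStep, pvBStep]
  · rw [hf2]; dsimp only; rw [ha]; push_cast; ring
  · rw [hf2]; dsimp only; rw [hf5]; dsimp only; rw [hb]; push_cast; ring
  · -- qm component
    rw [hf2]; dsimp only; rw [hf5]; dsimp only
    rw [PySem.Int.mod_eq_emod_of_pos (by norm_num), hqm]
    conv_rhs => rw [Int.mul_emod]
    conv_lhs => rw [Int.mul_emod]
    rw [Int.emod_emod_of_dvd _ dvd_rfl]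
  · -- q component
    rw [hf2]; dsimp only; rw [hf5]; dsimp only
    by_cases hQM : Q < 10 ^ 10
    · rw [if_pos hQM] at hq
      rw [hq]
      dsimp only
      by_cases hbig : (10:Int) ^ 10 ≤ Q * j
      · rw [if_pos hbig, if_neg (by omega)]
      · rw [if_neg hbig, if_pos (by omega)]
    · rw [if_neg hQM] at hq
      rw [hq]
      have : (10:Int) ^ 10 ≤ Q * j := le_trans (by omega) (le_mul_of_one_le_right (by omega) hj)
      rw [if_neg (by omega)]
  · -- C component
    rw [hsufi, hstrip]; dsimp only
    rw [hC]
    have : m + m' = min (aN + x) (bN + y) := by omega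
    push_cast [← this]
    ring
  · -- val component
    rw [hval]
  · -- pre component
    rw [hpre]
  · -- suf component
    rw [hsufi, hstrip]; dsimp only
    have e1 : aN - m + x - m' = aN + x - min (aN + x) (bN + y) := by omega
    have e2 : bN - m + y - m' = bN + y - min (aN + x) (bN + y) := by omega
    rw [e1, e2]

lemma pvInv_fold (L : List Int) (hL : ∀ i ∈ L, 1 ≤ i)
    (sA : Int × Int × Int × Int) (sB : Int × Int × Int × Option Int × Int × Int)
    (h : pvInv sA sB) : pvInv (L.foldl pvAStep sA) (L.foldl pvBStep sB) := by
  induction L generalizing sA sB with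
  | nil => exact h
  | cons x xs ih =>
    exact ih (fun i hi => hL i (List.mem_cons_of_mem _ hi)) _ _
      (pvInv_step _ _ _ (hL x (List.mem_cons_self)) h)

-- ===== VERDICT (by name: the statement is the Claim_ definition above) =====
theorem abbreviateProduct_spec : Claim_equal_abbreviateProduct := by
  intro left right _ hpre
  unfold Spec_abbreviateProduct
  have hL : ∀ i ∈ PySem.List.pyRange left (right + 1), 1 ≤ i := by
    intro i hi
    rcases hpre with h1 | h1
    · have := (PySem.List.mem_pyRange_one.mp hi).1; omega
    · rw [PySem.List.pyRange_one_eq_nil (by omega)] at hi; cases hi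
  have hinit : pvInv (0, 1, 1, 1) (0, 0, 1, some 1, 1, 1) := by
    refine ⟨0, 0, 1, ?_, ?_, ?_, ?_, ?_, ?_, ?_, ?_, ?_, ?_, ?_⟩ <;> norm_num
  have hinv := pvInv_fold _ hL (0, 1, 1, 1) (0, 0, 1, some 1, 1, 1) hinit
  obtain ⟨C, val, pre, suf, hfa⟩ :
      ∃ C val pre suf, (PySem.List.pyRange left (right + 1)).foldl pvAStep (0, 1, 1, 1)
        = (C, val, pre, suf) := ⟨_, _, _, _, rfl⟩
  obtain ⟨a, b, qm, q, pre', val', hfb⟩ :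
      ∃ a b qm q pre' val', (PySem.List.pyRange left (right + 1)).foldl pvBStep (0, 0, 1, some 1, 1, 1)
        = (a, b, qm, q, pre', val') := ⟨_, _, _, _, _, _, rfl⟩
  rw [hfa, hfb] at hinv
  obtain ⟨aN, bN, Q, ha, hb, hQ1, hQ2, hQ5, hqm, hq, hC, hval, hpre', hsuf⟩ := hinv
  dsimp only at ha hb hqm hq hC hval hpre' hsuf
  unfold abbreviateProduct abbreviateProduct_alt
  rw [hfa, hfb]
  dsimp only
  subst ha hb hC hval hpre' hqm
  rw [show (min (↑aN) (↑bN) : Int) = ((min aN bN : Nat) : Int) from (Nat.cast_min _ _).symm]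
  by_cases hlen : PySem.Str.len (PySem.Int.toStr val) ≤ 10
  · rw [if_pos hlen, if_pos hlen]
  · rw [if_neg hlen, if_neg hlen]
    set e1 : Nat := aN - min aN bN with he1
    set e2 : Nat := bN - min aN bN with he2
    have ht1 : ((aN:Int) - ↑(min aN bN)).toNat = e1 := by omega
    have ht2 : ((bN:Int) - ↑(min aN bN)).toNat = e2 := by omega
    rw [ht1, ht2]
    have f1 : (1:Int) ≤ 2 ^ e1 := one_le_pow₀ (by norm_num)
    have f2 : (1:Int) ≤ 5 ^ e2 := one_le_pow₀ (by norm_num)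
    have hKM : ((10:Int) ^ 5) ∣ 10 ^ 10 := pow_dvd_pow 10 (by omega)
    have hpadEq : (10:Int) ^ 10 ≤ suf →
        PySem.Str.slice (PySem.Int.toStr suf) (some (-5)) none =
          PySem.Str.zfill (PySem.Int.toStr (PySem.Int.mod
            (PySem.Int.powMod 2 e1 (10 ^ 10) * PySem.Int.powMod 5 e2 (10 ^ 10) * (Q % 10 ^ 10)) (10 ^ 5))) 5 := by
      intro hbig
      rw [pvSliceLast5 suf hbig]
      congr 2
      rw [PySem.Int.powMod, PySem.Int.powMod,
        PySem.Int.mod_eq_emod_of_pos (a := 2 ^ e1) (by norm_num),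
        PySem.Int.mod_eq_emod_of_pos (a := 5 ^ e2) (by norm_num),
        PySem.Int.mod_eq_emod_of_pos (by norm_num), hsuf]
      have m1 : Int.ModEq (10 ^ 5) (2 ^ e1 % 10 ^ 10) (2 ^ e1) := Int.emod_emod_of_dvd _ hKM
      have m2 : Int.ModEq (10 ^ 5) (5 ^ e2 % 10 ^ 10) (5 ^ e2) := Int.emod_emod_of_dvd _ hKM
      have m3 : Int.ModEq (10 ^ 5) (Q % 10 ^ 10) Q := Int.emod_emod_of_dvd _ hKM
      exact ((m1.mul m2).mul m3).symm
    by_cases hQM : Q < 10 ^ 10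
    · rw [if_pos hQM] at hq
      rw [hq]
      dsimp only
      by_cases hcond : ((aN:Int) - ↑(min aN bN) ≤ 40 ∧ (bN:Int) - ↑(min aN bN) ≤ 40)
      · rw [if_pos hcond, ← hsuf]
      · rw [if_neg hcond]
        rw [Classical.not_and_iff_not_or_not] at hcond
        have hbig : (10:Int) ^ 10 ≤ suf := by
          by_cases h41 : 41 ≤ e1
          · have hp : (10:Int) ^ 10 ≤ 2 ^ e1 :=
              le_trans (by norm_num) (pow_le_pow_right₀ (by norm_num) h41)
            rw [hsuf]
            calc (10:Int) ^ 10 ≤ 2 ^ e1 := hp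
              _ ≤ 2 ^ e1 * 5 ^ e2 := le_mul_of_one_le_right (by positivity) f2
              _ ≤ 2 ^ e1 * 5 ^ e2 * Q := le_mul_of_one_le_right (by positivity) hQ1
          · have h42 : 41 ≤ e2 := by
              rcases hcond with hx | hx <;> omega
            have hp : (10:Int) ^ 10 ≤ 5 ^ e2 :=
              le_trans (by norm_num) (pow_le_pow_right₀ (by norm_num) h42)
            rw [hsuf]
            calc (10:Int) ^ 10 ≤ 5 ^ e2 := hp
              _ ≤ 2 ^ e1 * 5 ^ e2 := le_mul_of_one_le_left (by positivity) f1
              _ ≤ 2 ^ e1 * 5 ^ e2 * Q := le_mul_of_one_le_right (by positivity) hQ1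
        rw [hpadEq hbig]
    · rw [if_neg hQM] at hq
      rw [hq]
      dsimp only
      have hbig : (10:Int) ^ 10 ≤ suf := by
        have h1 : Q ≤ 2 ^ e1 * 5 ^ e2 * Q :=
          le_mul_of_one_le_left (by omega) (one_le_mul_of_one_le_of_one_le f1 f2)
        rw [hsuf]; omega
      rw [hpadEq hbig]
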